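-- pv_equiv track=rewrite | github.com/apostonaut/6.00.1x | problem_sets/probset1/longest_alpha_substring.py | longest_alphabetic_substring
-- ===== SOURCE A (Python) =====
-- def longest_alphabetic_substring(s):
--     """
--     A program that prints the longest substring of s in which the letters occur in alphabetical order,
--     where s is a string of lower case characters.
--     :param s: String
--     :return: String
--
--     >>> s = 'abcd'
--     >>> longest_alphabetic_substring(s)
--     'abcd'
--     >>> s = 'mspljehgdtrrxyropmrr'
--     >>> longest_alphabetic_substring(s)
--     'rrxy'
--
--     """
--     string = s
--     index = 0
--     lst = []
--     while len(string) >= 2 and index < (len(string)-1):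
--
--         if string[index] <= string[index + 1]:
--             index += 1
--             if index == len(string)-1:
--                 lst.append(string)
--         elif string[index] >= string[index + 1]:
--             lst.append(string[:index + 1])
--             string = string[index + 1 :]
--             index = 0
--
--     longest = ''
--     for item in lst:
--         if len(item) > len (longest):
--             longest = item
--     return(longest)
-- ===== SOURCE B (Python) =====
-- def longest_alphabetic_substring(s):
--     """Single pass: track the current non-decreasing run and the best run seen so far
--     (strict > keeps the first run on ties)."""
--     best = ''
--     cur = ''
--     for ch in s:
--         if cur and cur[-1] > ch:
--             if len(cur) > len(best):
--                 best = cur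
--             cur = ch
--         else:
--             cur += ch
--     if len(cur) > len(best):
--         best = cur
--     return best
-- ===== Notes on version B (the rewrite author's own statement) =====
-- stated objective: faster
-- what changed: Replaces A's while-loop that repeatedly slices the string at each run break (and a second pass over the collected run list) with a single left-to-right pass tracking the current non-decreasing run and the best-so-far with strict comparison.
-- intended difference: On single-character strings A returns an empty result while B returns the one-letter string itself; the longest alphabetically-ordered substring of a one-letter string is that letter, so B's value is the intended one. — e.g. on longest_alphabetic_substring("a"): A returns "", B returns "a"
import Mathlib
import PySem

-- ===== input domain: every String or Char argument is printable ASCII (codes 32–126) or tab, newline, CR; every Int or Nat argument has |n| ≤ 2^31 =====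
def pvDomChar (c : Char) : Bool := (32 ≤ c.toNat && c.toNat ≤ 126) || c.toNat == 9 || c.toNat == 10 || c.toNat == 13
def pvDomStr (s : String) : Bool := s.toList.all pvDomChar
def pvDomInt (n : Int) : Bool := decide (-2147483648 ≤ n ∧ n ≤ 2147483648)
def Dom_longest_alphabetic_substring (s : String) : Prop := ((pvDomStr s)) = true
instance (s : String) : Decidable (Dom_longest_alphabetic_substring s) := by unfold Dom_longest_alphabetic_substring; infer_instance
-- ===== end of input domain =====

-- B replaces A's quadratic slice-at-each-break while-loop (plus a second max pass over
-- the collected run list) by one linear pass tracking the current run and the best-so-far.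

-- ===== PORT A =====
-- A's while loop over (string, index, lst); Python indexing/slicing here always uses
-- in-range non-negative indices, so getD/take/drop are exact.
def pvALoop (string : List Char) (index : Nat) (lst : List (List Char)) : List (List Char) :=
  if _h : 2 ≤ string.length ∧ index < string.length - 1 then
    if string.getD index ' ' ≤ string.getD (index + 1) ' ' then
      pvALoop string (index + 1)
        (if index + 1 = string.length - 1 then lst ++ [string] else lst)
    else
      pvALoop (string.drop (index + 1)) 0 (lst ++ [string.take (index + 1)])
  else lst
termination_by string.length - index
decreasing_by
  · omega
  · simp; omega

def longest_alphabetic_substring (s : String) : String :=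
  String.ofList ((pvALoop s.toList 0 []).foldl
    (fun longest item => if longest.length < item.length then item else longest) [])

-- ===== PORT B =====
def pvBStep (st : List Char × List Char) (ch : Char) : List Char × List Char :=
  if st.2 ≠ [] ∧ ch < st.2.getLastD ' ' then
    ((if st.1.length < st.2.length then st.2 else st.1), [ch])
  else (st.1, st.2 ++ [ch])

def longest_alphabetic_substring_alt (s : String) : String :=
  let p := s.toList.foldl pvBStep ([], [])
  String.ofList (if p.1.length < p.2.length then p.2 else p.1)

-- ===== PRECONDITION & SPEC =====
-- On single-character strings A returns an empty result while B returns the one-letter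
-- string itself; the longest alphabetically-ordered substring of a one-letter string is
-- that letter, so B's value is the intended one.
def D_longest_alphabetic_substring (s : String) : Prop := s.toList.length = 1
instance (s : String) : Decidable (D_longest_alphabetic_substring s) := by
  unfold D_longest_alphabetic_substring; infer_instance

def Spec_longest_alphabetic_substring (s : String) (out : String) : Prop :=
  ¬ D_longest_alphabetic_substring s → out = longest_alphabetic_substring_alt s
instance (s : String) (out : String) : Decidable (Spec_longest_alphabetic_substring s out) := by
  unfold Spec_longest_alphabetic_substring; infer_instance

def pvDiffWitness_longest_alphabetic_substring : String := "a"
def pvDiffWitnessOut_longest_alphabetic_substring : String × String := ("", "a")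

-- ===== CLAIM (what is proved, stated in full; the proofs are below) =====
def Claim_unchanged_longest_alphabetic_substring : Prop := ∀ (s : String), Dom_longest_alphabetic_substring s → Spec_longest_alphabetic_substring s (longest_alphabetic_substring s)
def Claim_changed_longest_alphabetic_substring : Prop := Dom_longest_alphabetic_substring (pvDiffWitness_longest_alphabetic_substring) ∧ D_longest_alphabetic_substring (pvDiffWitness_longest_alphabetic_substring) ∧ longest_alphabetic_substring (pvDiffWitness_longest_alphabetic_substring) = pvDiffWitnessOut_longest_alphabetic_substring.1 ∧ longest_alphabetic_substring_alt (pvDiffWitness_longest_alphabetic_substring) = pvDiffWitnessOut_longest_alphabetic_substring.2 ∧ pvDiffWitnessOut_longest_alphabetic_substring.1 ≠ pvDiffWitnessOut_longest_alphabetic_substring.2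
def Claim_exact_longest_alphabetic_substring : Prop := ∀ (s : String), Dom_longest_alphabetic_substring s → D_longest_alphabetic_substring s → longest_alphabetic_substring s ≠ longest_alphabetic_substring_alt s

-- ===== LEMMAS AND PROOFS =====

-- the maximal non-decreasing runs of c ++ rest (c the run in progress), as A collects
-- them: a final run of length < 2 is dropped
def runsA (c : List Char) : List Char → List (List Char)
  | [] => if 2 ≤ c.length then [c] else []
  | x :: rest => if c.getLastD ' ' ≤ x then runsA (c ++ [x]) rest else c :: runsA [x] rest

-- the same runs as B sees them: every run kept
def runsB (c : List Char) : List Char → List (List Char)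
  | [] => [c]
  | x :: rest => if c.getLastD ' ' ≤ x then runsB (c ++ [x]) rest else c :: runsB [x] rest

-- A's final max-by-length pass
def mstep (longest item : List Char) : List Char :=
  if longest.length < item.length then item else longest

theorem getD_append_last (c l : List Char) (d : Char) (h : c ≠ []) :
    (c ++ l).getD (c.length - 1) d = c.getLastD d := by
  have h1 : c.length - 1 < c.length := by cases c <;> simp_all
  rw [List.getD_append _ _ _ _ h1, List.getLastD_eq_getLast?, List.getLast?_eq_getElem?]
  simp [List.getD_eq_getElem?_getD]

theorem getD_append_len (c : List Char) (x : Char) (l : List Char) (d : Char) :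
    (c ++ x :: l).getD c.length d = x := by
  simp [List.getD_eq_getElem?_getD]

theorem aloop_eq : ∀ (rest c : List Char) (lst : List (List Char)), c ≠ [] → rest ≠ [] →
    pvALoop (c ++ rest) (c.length - 1) lst = lst ++ runsA c rest := by
  intro rest
  induction rest with
  | nil => intro _ _ _ h; simp at h
  | cons x t ih =>
    intro c lst hc _
    have hcl : 1 ≤ c.length := by cases c <;> simp_all
    rw [pvALoop]
    have hcond : 2 ≤ (c ++ x :: t).length ∧ c.length - 1 < (c ++ x :: t).length - 1 := by
      simp; omega
    rw [dif_pos hcond]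
    have hidx : c.length - 1 + 1 = c.length := by omega
    rw [hidx, getD_append_last _ _ _ hc, getD_append_len]
    simp only [runsA]
    by_cases hle : c.getLastD ' ' ≤ x
    · rw [if_pos hle, if_pos hle]
      rcases t with _ | ⟨y, u⟩
      · -- extension reaches the end: the whole remaining string is appended
        have hlen : c.length = (c ++ [x]).length - 1 := by simp
        rw [if_pos hlen, pvALoop]
        rw [dif_neg (by simp)]
        simp only [runsA]
        rw [if_pos (by simp; omega)]
      · have hne : ¬ c.length = (c ++ x :: y :: u).length - 1 := by simp
        rw [if_neg hne]
        have hsplit : c ++ x :: y :: u = (c ++ [x]) ++ y :: u := by simp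
        have hlen2 : c.length = (c ++ [x]).length - 1 := by simp
        rw [hsplit, hlen2, ih (c ++ [x]) lst (by simp) (by simp)]
    · rw [if_neg hle, if_neg hle]
      have hdrop : (c ++ x :: t).drop c.length = x :: t := List.drop_left
      have htake : (c ++ x :: t).take c.length = c := List.take_left
      rw [hdrop, htake]
      rcases t with _ | ⟨y, u⟩
      · rw [pvALoop]
        have hstop : ¬(2 ≤ ([x] : List Char).length ∧ 0 < ([x] : List Char).length - 1) := by
          simp
        rw [dif_neg hstop]
        simp only [runsA]
        norm_num
      · have hx : (x :: y :: u) = [x] ++ y :: u := rfl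
        rw [hx, show (0 : Nat) = ([x] : List Char).length - 1 from rfl,
          ih [x] (lst ++ [c]) (by simp) (by simp)]
        simp

theorem bfold_eq : ∀ (t : List Char) (best c : List Char), c ≠ [] →
    mstep (List.foldl pvBStep (best, c) t).1 (List.foldl pvBStep (best, c) t).2 =
      List.foldl mstep best (runsB c t) := by
  intro t
  induction t with
  | nil => intro best c _; simp [runsB]
  | cons x u ih =>
    intro best c hc
    simp only [List.foldl_cons, runsB]
    by_cases hle : c.getLastD ' ' ≤ x
    · have hstep : pvBStep (best, c) x = (best, c ++ [x]) := by
        unfold pvBStep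
        rw [if_neg]
        intro h
        exact absurd hle (not_le.mpr h.2)
      rw [hstep, if_pos hle]
      exact ih best (c ++ [x]) (by simp)
    · have hstep : pvBStep (best, c) x =
          ((if best.length < c.length then c else best), [x]) := by
        unfold pvBStep
        rw [if_pos ⟨hc, lt_of_not_ge hle⟩]
      rw [hstep, if_neg hle, List.foldl_cons]
      rw [ih _ [x] (by simp)]
      rfl

theorem mstep_ne (best c : List Char) (hc : c ≠ []) : mstep best c ≠ [] := by
  unfold mstep
  split
  · exact hc
  · rename_i h
    intro hb
    subst hb
    simp at h
    exact hc h

theorem maxRuns_eq : ∀ (rest c best : List Char), c ≠ [] →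
    (2 ≤ c.length ∨ best ≠ [] ∨ rest ≠ []) →
    List.foldl mstep best (runsA c rest) = List.foldl mstep best (runsB c rest) := by
  intro rest
  induction rest with
  | nil =>
    intro c best hc hor
    simp only [runsA, runsB]
    rcases hor with h2 | hb | hr
    · rw [if_pos h2]
    · by_cases h2 : 2 ≤ c.length
      · rw [if_pos h2]
      · have hc1 : c.length = 1 := by
          have := List.length_pos_iff.mpr hc
          omega
        have hblen : 1 ≤ best.length := List.length_pos_iff.mpr hb
        rw [if_neg h2]
        simp only [List.foldl_cons, List.foldl_nil, mstep, hc1]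
        rw [if_neg (by omega)]
    · simp at hr
  | cons x u ih =>
    intro c best hc _
    simp only [runsA, runsB]
    by_cases hle : c.getLastD ' ' ≤ x
    · rw [if_pos hle, if_pos hle]
      refine ih (c ++ [x]) best (by simp) (Or.inl ?_)
      have := List.length_pos_iff.mpr hc
      simp; omega
    · rw [if_neg hle, if_neg hle, List.foldl_cons, List.foldl_cons]
      exact ih [x] (mstep best c) (by simp) (Or.inr (Or.inl (mstep_ne best c hc)))

theorem longest_alphabetic_substring_spec : Claim_unchanged_longest_alphabetic_substring := by
  intro s _ hnd
  unfold longest_alphabetic_substring longest_alphabetic_substring_alt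
  have hfold : (fun (longest item : List Char) =>
      if longest.length < item.length then item else longest) = mstep := rfl
  rw [hfold]
  rcases hl : s.toList with _ | ⟨x, t⟩
  · rw [pvALoop]; simp
  · rcases t with _ | ⟨y, u⟩
    · exact absurd (by simp [D_longest_alphabetic_substring, hl]) hnd
    · have hA : pvALoop (x :: y :: u) 0 [] = runsA [x] (y :: u) := by
        have := aloop_eq (y :: u) [x] [] (by simp) (by simp)
        simpa using this
      rw [hA]
      have hB : List.foldl pvBStep ([], []) (x :: y :: u) =
          List.foldl pvBStep ([], [x]) (y :: u) := by
        simp only [List.foldl_cons]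
        rfl
      simp only [hB]
      have hb := bfold_eq (y :: u) [] [x] (by simp)
      simp only [mstep] at hb
      rw [hb]
      rw [maxRuns_eq (y :: u) [x] [] (by simp) (Or.inr (Or.inr (by simp)))]

theorem longest_alphabetic_substring_changed : Claim_changed_longest_alphabetic_substring := by
  unfold Claim_changed_longest_alphabetic_substring
  refine ⟨by decide, by decide, ?_, by decide, by decide⟩
  unfold pvDiffWitness_longest_alphabetic_substring pvDiffWitnessOut_longest_alphabetic_substring
  unfold longest_alphabetic_substring
  rw [show ("a" : String).toList = ['a'] from by decide, pvALoop]
  rw [dif_neg (by decide)]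
  decide

theorem longest_alphabetic_substring_tight : Claim_exact_longest_alphabetic_substring := by
  intro s _ hd
  unfold D_longest_alphabetic_substring at hd
  rcases hl : s.toList with _ | ⟨x, t⟩
  · simp [hl] at hd
  · rcases t with _ | ⟨y, u⟩
    · unfold longest_alphabetic_substring longest_alphabetic_substring_alt
      rw [hl, pvALoop]
      simp only [List.foldl_cons, List.foldl_nil]
      have hstep : pvBStep ([], []) x = ([], [x]) := by unfold pvBStep; simp
      rw [hstep]
      have hstop : ¬(2 ≤ ([x] : List Char).length ∧ 0 < ([x] : List Char).length - 1) := by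
        simp
      rw [dif_neg hstop]
      simp only [List.foldl_nil, List.length_nil, List.length_cons]
      intro h
      have := congrArg String.toList h
      simp at this
    · simp [hl] at hd
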